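-- pv_equiv track=rewrite | github.com/Muacca/DPPUv2-paper02 | script/scripts/proofs/symbolic_block_all_topologies.py | levi_civita_4d
-- ===== SOURCE A (Python) =====
-- def levi_civita_4d(i, j, k, l):
--     """4D Levi-Civita symbol with epsilon_{0123} = +1."""
--     indices = [i, j, k, l]
--     if len(set(indices)) != 4:
--         return 0
--     inversions = 0
--     arr = list(indices)
--     for m in range(4):
--         for n in range(m + 1, 4):
--             if arr[m] > arr[n]:
--                 inversions += 1
--     return 1 if inversions % 2 == 0 else -1
-- ===== SOURCE B (Python) =====
-- def levi_civita_4d(i, j, k, l):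
--     """4D Levi-Civita symbol with epsilon_{0123} = +1 (cycle-count method)."""
--     vals = (i, j, k, l)
--     if i == j or i == k or i == l or j == k or j == l or k == l:
--         return 0
--     # perm[m] = rank of vals[m] among the four (a permutation of 0..3)
--     perm = [sum(1 for w in vals if w < v) for v in vals]
--     visited = [False, False, False, False]
--     cycles = 0
--     for m in range(4):
--         if not visited[m]:
--             cycles += 1
--             n = m
--             while not visited[n]:
--                 visited[n] = True
--                 n = perm[n]
--     return 1 if (4 - cycles) % 2 == 0 else -1
-- ===== Notes on version B (the rewrite author's own statement) =====
-- stated objective: alternative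
-- what changed: Replaces A's nested-loop pairwise inversion count by ranking the four indices (count of strictly smaller values) and counting the cycles of the resulting permutation with a visited array; sign = parity of 4 - #cycles.
import Mathlib
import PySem

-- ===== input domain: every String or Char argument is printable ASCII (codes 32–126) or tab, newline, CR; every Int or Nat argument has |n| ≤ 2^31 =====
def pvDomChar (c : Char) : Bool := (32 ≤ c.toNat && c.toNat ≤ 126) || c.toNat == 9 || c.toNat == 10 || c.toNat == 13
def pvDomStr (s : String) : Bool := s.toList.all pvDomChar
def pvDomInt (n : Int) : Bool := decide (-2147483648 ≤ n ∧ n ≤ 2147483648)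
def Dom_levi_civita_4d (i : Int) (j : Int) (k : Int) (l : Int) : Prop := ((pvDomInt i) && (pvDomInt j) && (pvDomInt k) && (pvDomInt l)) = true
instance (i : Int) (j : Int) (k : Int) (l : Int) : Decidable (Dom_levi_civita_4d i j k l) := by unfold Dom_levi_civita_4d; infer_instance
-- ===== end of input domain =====

-- B replaces A's pairwise inversion count by ranking the four indices and counting
-- permutation cycles (sign = parity of 4 - #cycles); objective: alternative decomposition.

-- ===== PORT A =====
def levi_civita_4d (i : Int) (j : Int) (k : Int) (l : Int) : Int :=
  let indices : List Int := [i, j, k, l]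
  if (PySem.Set.ofList indices).length ≠ 4 then 0
  else
    let arr : List Int := indices
    let inversions : Int :=
      (PySem.List.pyRange 0 4 1).foldl (fun inv m =>
        (PySem.List.pyRange (m + 1) 4 1).foldl (fun inv n =>
          if PySem.List.pyGetD arr n 0 < PySem.List.pyGetD arr m 0 then inv + 1 else inv) inv) 0
    if PySem.Int.mod inversions 2 = 0 then 1 else -1

-- ===== PORT B =====
-- the inner 'while not visited[n]' loop of Source B; fuel 4 suffices (each step marks a cell)
def followCycle (perm : List Int) (visited : List Bool) (n : Int) : Nat → List Bool
  | 0 => visited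
  | fuel + 1 =>
    if !(PySem.List.pyGetD visited n false) then
      followCycle perm (PySem.List.pySetD visited n true) (PySem.List.pyGetD perm n 0) fuel
    else visited

def levi_civita_4d_alt (i : Int) (j : Int) (k : Int) (l : Int) : Int :=
  if i == j || i == k || i == l || j == k || j == l || k == l then 0
  else
    let vals : List Int := [i, j, k, l]
    let perm : List Int := vals.map (fun v => vals.foldl (fun s w => if w < v then s + 1 else s) (0 : Int))
    let st : List Bool × Int :=
      (PySem.List.pyRange 0 4 1).foldl (fun st m =>
        if !(PySem.List.pyGetD st.1 m false) then
          (followCycle perm st.1 m 4, st.2 + 1)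
        else st) ([false, false, false, false], (0 : Int))
    if PySem.Int.mod (4 - st.2) 2 = 0 then 1 else -1

-- ===== PRECONDITION & SPEC =====
def Spec_levi_civita_4d (i : Int) (j : Int) (k : Int) (l : Int) (out : Int) : Prop := out = levi_civita_4d_alt i j k l
instance (i : Int) (j : Int) (k : Int) (l : Int) (out : Int) : Decidable (Spec_levi_civita_4d i j k l out) := by unfold Spec_levi_civita_4d; infer_instance

-- ===== CLAIM (what is proved, stated in full; the proofs are below) =====
def Claim_equal_levi_civita_4d : Prop := ∀ (i : Int) (j : Int) (k : Int) (l : Int), Dom_levi_civita_4d i j k l → Spec_levi_civita_4d i j k l (levi_civita_4d i j k l)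

-- ===== LEMMAS AND PROOFS =====

-- rank of x among the four values: number of them strictly below x (foldl order of Source B)
def cnt (i j k l x : Int) : Int :=
  ((((0 : Int) + (if i < x then 1 else 0)) + (if j < x then 1 else 0)) + (if k < x then 1 else 0)) + (if l < x then 1 else 0)

-- the cycle-counting tail of Source B, as a function of the rank list
def cycleSign (perm : List Int) : Int :=
  let st : List Bool × Int :=
    (PySem.List.pyRange 0 4 1).foldl (fun st m =>
      if !(PySem.List.pyGetD st.1 m false) then
        (followCycle perm st.1 m 4, st.2 + 1)
      else st) ([false, false, false, false], (0 : Int))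
  if PySem.Int.mod (4 - st.2) 2 = 0 then 1 else -1

lemma cnt_mono (i j k l x y : Int) (hx : x = i ∨ x = j ∨ x = k ∨ x = l) (h : x < y) :
    cnt i j k l x < cnt i j k l y := by
  unfold cnt; rcases hx with rfl | rfl | rfl | rfl <;> split_ifs <;> omega

lemma cnt_lt_iff (i j k l x y : Int) (hx : x = i ∨ x = j ∨ x = k ∨ x = l)
    (hy : y = i ∨ y = j ∨ y = k ∨ y = l) : x < y ↔ cnt i j k l x < cnt i j k l y := by
  constructor
  · exact cnt_mono i j k l x y hx
  · intro h
    rcases lt_trichotomy x y with h' | h' | h'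
    · exact h'
    · subst h'; omega
    · exact absurd (cnt_mono i j k l y x hy h') (by omega)

lemma cnt_ne (i j k l x y : Int) (hx : x = i ∨ x = j ∨ x = k ∨ x = l)
    (hy : y = i ∨ y = j ∨ y = k ∨ y = l) (h : x ≠ y) : cnt i j k l x ≠ cnt i j k l y := by
  rcases lt_trichotomy x y with h' | h' | h'
  · exact ne_of_lt (cnt_mono i j k l x y hx h')
  · exact absurd h' h
  · exact ne_of_gt (cnt_mono i j k l y x hy h')

lemma cnt_bounds_i (i j k l : Int) : 0 ≤ cnt i j k l i ∧ cnt i j k l i ≤ 3 := by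
  unfold cnt; split_ifs <;> omega
lemma cnt_bounds_j (i j k l : Int) : 0 ≤ cnt i j k l j ∧ cnt i j k l j ≤ 3 := by
  unfold cnt; split_ifs <;> omega
lemma cnt_bounds_k (i j k l : Int) : 0 ≤ cnt i j k l k ∧ cnt i j k l k ≤ 3 := by
  unfold cnt; split_ifs <;> omega
lemma cnt_bounds_l (i j k l : Int) : 0 ≤ cnt i j k l l ∧ cnt i j k l l ≤ 3 := by
  unfold cnt; split_ifs <;> omega

lemma guard_iff (i j k l : Int) :
    (PySem.Set.ofList [i, j, k, l]).length ≠ 4 ↔ (i = j ∨ i = k ∨ i = l ∨ j = k ∨ j = l ∨ k = l) := by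
  by_cases h1 : i = j <;> by_cases h2 : i = k <;> by_cases h3 : i = l <;>
  by_cases h4 : j = k <;> by_cases h5 : j = l <;> by_cases h6 : k = l <;>
  simp_all [PySem.Set.ofList, PySem.Set.add, PySem.Set.contains, List.foldl] <;>
  split_ifs <;> simp_all <;> omega

lemma A_char (i j k l : Int) :
    levi_civita_4d i j k l =
      if i = j ∨ i = k ∨ i = l ∨ j = k ∨ j = l ∨ k = l then 0
      else
        if PySem.Int.mod
            ((((((0 + (if j < i then (1:Int) else 0)) + (if k < i then 1 else 0)) + (if l < i then 1 else 0))
              + (if k < j then 1 else 0)) + (if l < j then 1 else 0)) + (if l < k then 1 else 0)) 2 = 0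
        then 1 else -1 := by
  rw [levi_civita_4d, if_congr (guard_iff i j k l) rfl rfl]
  have hr0 : PySem.List.pyRange 0 4 1 = [0, 1, 2, 3] := by decide
  have hr1 : PySem.List.pyRange (0 + 1) 4 1 = [1, 2, 3] := by decide
  have hr2 : PySem.List.pyRange (1 + 1) 4 1 = [2, 3] := by decide
  have hr3 : PySem.List.pyRange (2 + 1) 4 1 = [3] := by decide
  have hr4 : PySem.List.pyRange (3 + 1) 4 1 = [] := by decide
  have g0 : PySem.List.pyGetD [i, j, k, l] 0 0 = i := rfl
  have g1 : PySem.List.pyGetD [i, j, k, l] 1 0 = j := rfl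
  have g2 : PySem.List.pyGetD [i, j, k, l] 2 0 = k := rfl
  have g3 : PySem.List.pyGetD [i, j, k, l] 3 0 = l := rfl
  have step : ∀ (c : Prop) [Decidable c] (a : Int), (if c then a + 1 else a) = a + (if c then 1 else 0) := by
    intro c _ a; split_ifs <;> ring
  simp only [hr0, List.foldl, hr1, hr2, hr3, hr4, g0, g1, g2, g3, step]

lemma B_char (i j k l : Int) :
    levi_civita_4d_alt i j k l =
      if i = j ∨ i = k ∨ i = l ∨ j = k ∨ j = l ∨ k = l then 0
      else cycleSign [cnt i j k l i, cnt i j k l j, cnt i j k l k, cnt i j k l l] := by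
  rw [levi_civita_4d_alt]
  have step : ∀ (c : Prop) [Decidable c] (a : Int), (if c then a + 1 else a) = a + (if c then 1 else 0) := by
    intro c _ a; split_ifs <;> ring
  by_cases h : i = j ∨ i = k ∨ i = l ∨ j = k ∨ j = l ∨ k = l
  · have hb : (i == j || i == k || i == l || j == k || j == l || k == l) = true := by
      rcases h with h | h | h | h | h | h <;> simp [h]
    rw [if_pos hb, if_pos h]
  · have hb : ¬ (i == j || i == k || i == l || j == k || j == l || k == l) = true := by
      push Not at h
      simp [h.1, h.2.1, h.2.2.1, h.2.2.2.1, h.2.2.2.2.1, h.2.2.2.2.2]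
    rw [if_neg hb, if_neg h]
    simp only [cycleSign, cnt, List.map, List.foldl, step]

-- the fully generalized rank form: decided case by case over ranks 0..3
lemma rank_case (a b c d : Int)
    (ha : 0 ≤ a ∧ a ≤ 3) (hb : 0 ≤ b ∧ b ≤ 3) (hc : 0 ≤ c ∧ c ≤ 3) (hd : 0 ≤ d ∧ d ≤ 3) :
    a ≠ b → a ≠ c → a ≠ d → b ≠ c → b ≠ d → c ≠ d →
    (if PySem.Int.mod
        ((((((0 + (if b < a then (1:Int) else 0)) + (if c < a then 1 else 0)) + (if d < a then 1 else 0))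
          + (if c < b then 1 else 0)) + (if d < b then 1 else 0)) + (if d < c then 1 else 0)) 2 = 0
     then (1:Int) else -1) = cycleSign [a, b, c, d] := by
  obtain ⟨ha0, ha1⟩ := ha
  obtain ⟨hb0, hb1⟩ := hb
  obtain ⟨hc0, hc1⟩ := hc
  obtain ⟨hd0, hd1⟩ := hd
  interval_cases a <;> interval_cases b <;> interval_cases c <;> interval_cases d <;> decide

-- ===== VERDICT (by name: the statement is the Claim_ definition above) =====
theorem levi_civita_4d_spec : Claim_equal_levi_civita_4d := by
  intro i j k l _
  unfold Spec_levi_civita_4d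
  rw [A_char, B_char]
  by_cases h : i = j ∨ i = k ∨ i = l ∨ j = k ∨ j = l ∨ k = l
  · simp [h]
  · rw [if_neg h, if_neg h]
    push Not at h
    obtain ⟨h1, h2, h3, h4, h5, h6⟩ := h
    have mi : i = i ∨ i = j ∨ i = k ∨ i = l := Or.inl rfl
    have mj : j = i ∨ j = j ∨ j = k ∨ j = l := Or.inr (Or.inl rfl)
    have mk : k = i ∨ k = j ∨ k = k ∨ k = l := Or.inr (Or.inr (Or.inl rfl))
    have ml : l = i ∨ l = j ∨ l = k ∨ l = l := Or.inr (Or.inr (Or.inr rfl))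
    simp only [cnt_lt_iff i j k l j i mj mi, cnt_lt_iff i j k l k i mk mi,
      cnt_lt_iff i j k l l i ml mi, cnt_lt_iff i j k l k j mk mj,
      cnt_lt_iff i j k l l j ml mj, cnt_lt_iff i j k l l k ml mk]
    exact rank_case (cnt i j k l i) (cnt i j k l j) (cnt i j k l k) (cnt i j k l l)
      (cnt_bounds_i i j k l) (cnt_bounds_j i j k l) (cnt_bounds_k i j k l) (cnt_bounds_l i j k l)
      (cnt_ne i j k l i j mi mj h1) (cnt_ne i j k l i k mi mk h2) (cnt_ne i j k l i l mi ml h3)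
      (cnt_ne i j k l j k mj mk h4) (cnt_ne i j k l j l mj ml h5) (cnt_ne i j k l k l mk ml h6)
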